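-- pv_equiv track=rewrite | github.com/Khan-Mohammad-Habibullah/maintainability-for-MLSystems | cohesion.py | get_reachable_functions
-- ===== SOURCE A (Python) =====
-- def get_reachable_functions(graph):
--
--     def dfs(node, graph, visited):
--         visited.add(node)
--         reachable = [node]
--         for neighbor in graph[node]:
--             if neighbor not in visited:
--                 reachable.extend(dfs(neighbor, graph, visited))
--         return reachable
--
--     reachable_dict = {}
--     for func in graph:
--         visited = set()
--         reachable_dict[func] = dfs(func, graph, visited)
--
--     return reachable_dict
-- ===== SOURCE B (Python) =====
-- def get_reachable_functions(graph):
--     reachable_dict = {}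
--     for func in graph:
--         visited = set()
--         reachable = []
--         stack = [func]
--         while stack:
--             node = stack.pop()
--             if node in visited:
--                 continue
--             visited.add(node)
--             reachable.append(node)
--             stack.extend(reversed(graph[node]))
--         reachable_dict[func] = reachable
--     return reachable_dict
-- ===== Notes on version B (the rewrite author's own statement) =====
-- stated objective: alternative
-- what changed: Replaces the nested recursive DFS with a mutated shared visited set by an iterative explicit-stack DFS (pop, skip if already visited, push reversed neighbors), which emits the same pre-order reachable list per source without recursion.
import Mathlib
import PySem

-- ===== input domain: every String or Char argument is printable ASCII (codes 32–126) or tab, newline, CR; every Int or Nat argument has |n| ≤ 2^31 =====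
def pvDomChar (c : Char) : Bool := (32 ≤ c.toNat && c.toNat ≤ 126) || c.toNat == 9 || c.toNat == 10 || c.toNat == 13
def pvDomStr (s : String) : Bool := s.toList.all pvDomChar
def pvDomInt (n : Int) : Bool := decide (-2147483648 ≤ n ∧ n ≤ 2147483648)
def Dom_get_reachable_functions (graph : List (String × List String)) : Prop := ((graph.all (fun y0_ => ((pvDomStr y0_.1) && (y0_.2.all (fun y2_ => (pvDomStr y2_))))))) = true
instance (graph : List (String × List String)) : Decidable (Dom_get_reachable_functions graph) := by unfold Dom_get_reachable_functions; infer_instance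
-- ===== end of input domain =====

-- B replaces A's shared-visited recursive DFS by the standard iterative explicit-stack DFS
-- (pop, skip if visited, push reversed neighbors); same exact preorder lists, same cost class.

-- ===== PORT A =====
-- A's inner `dfs` mutates `visited`, so the port threads the set through and returns it.
-- The fuel argument (Nat recursion) is a totality guard only: the top level passes
-- `d.size + 1`, which the proofs show is never exhausted (each nested call visits a new key).
mutual
def pvDfsA (d : PySem.Dict String (List String)) : Nat → String → PySem.Set String → List String × PySem.Set String
  | 0, _, v => ([], v)
  | Nat.succ f, node, v =>
      let v1 := PySem.Set.add v node                                  -- visited.add(node)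
      let p := pvLoopA d f (PySem.Dict.getD d node []) v1             -- for neighbor in graph[node]: …
      (node :: p.1, p.2)                                              -- reachable = [node] ++ …
  termination_by f _ _ => (f, 0)
def pvLoopA (d : PySem.Dict String (List String)) : Nat → List String → PySem.Set String → List String × PySem.Set String
  | _, [], v => ([], v)
  | f, n :: ns, v =>
      if PySem.Set.contains v n then pvLoopA d f ns v                 -- if neighbor not in visited: …
      else
        let p1 := pvDfsA d f n v                                      -- reachable.extend(dfs(neighbor, graph, visited))
        let p2 := pvLoopA d f ns p1.2
        (p1.1 ++ p2.1, p2.2)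
  termination_by f ns _ => (f, ns.length + 1)
end

def get_reachable_functions (graph : List (String × List String)) : List (String × List String) :=
  let d := PySem.Dict.ofList graph
  (List.foldl
      (fun rd func => PySem.Dict.insert rd func (pvDfsA d (PySem.Dict.size d + 1) func PySem.Set.empty).1)
      PySem.Dict.empty (PySem.Dict.keys d)).items

-- ===== PORT B =====
-- number of dict keys not yet visited (termination measure of the stack loop)
def pvUnvisitedKeys (d : PySem.Dict String (List String)) (v : PySem.Set String) : Nat :=
  ((PySem.Dict.keys d).filter (fun k => !(PySem.Set.contains v k))).length

-- termination helpers for pvGoB (cited in its decreasing_by)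
theorem pv_filter_length_lt {p q : String → Bool} (l : List String)
    (himp : ∀ x, p x = true → q x = true) (x0 : String) (hx0 : x0 ∈ l)
    (hq : q x0 = true) (hp : p x0 = false) : (l.filter p).length < (l.filter q).length := by
  induction l with
  | nil => cases hx0
  | cons a l ih =>
    have hle : (l.filter p).length ≤ (l.filter q).length := by
      rw [← List.countP_eq_length_filter, ← List.countP_eq_length_filter]
      exact List.countP_mono_left (fun x _ => himp x)
    rcases List.mem_cons.mp hx0 with h | h
    · subst h
      simp only [List.filter_cons, hp, hq, Bool.false_eq_true, if_false, if_true,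
        List.length_cons]
      omega
    · have hlt : (l.filter p).length < (l.filter q).length := ih h
      by_cases hpa : p a = true
      · have hqa := himp a hpa
        simp only [List.filter_cons, hpa, hqa, if_true, List.length_cons]
        omega
      · have hpa' : p a = false := by simpa using hpa
        by_cases hqa : q a = true
        · simp only [List.filter_cons, hpa', hqa, Bool.false_eq_true, if_false, if_true,
            List.length_cons]
          omega
        · have hqa' : q a = false := by simpa using hqa
          simp only [List.filter_cons, hpa', hqa', Bool.false_eq_true, if_false]
          omega

theorem pv_unvisited_lt (d : PySem.Dict String (List String)) (v : PySem.Set String)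
    (node : String) (hk : node ∈ PySem.Dict.keys d) (hnv : node ∉ v) :
    pvUnvisitedKeys d (PySem.Set.add v node) < pvUnvisitedKeys d v := by
  refine pv_filter_length_lt _ (fun x hx => ?_) node hk ?_ ?_
  · simp only [Bool.not_eq_true', ← Bool.not_eq_true, PySem.Set.contains,
      List.contains_iff_mem] at hx ⊢
    exact fun hmem => hx ((PySem.Set.mem_add v node x).mpr (Or.inl hmem))
  · simp only [Bool.not_eq_true', ← Bool.not_eq_true, PySem.Set.contains, List.contains_iff_mem]
    simpa using hnv
  · simp only [Bool.not_eq_true', ← Bool.not_eq_true, PySem.Set.contains, List.contains_iff_mem]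
    simp [(PySem.Set.mem_add v node node).mpr (Or.inr rfl)]

theorem pv_unvisited_mono (d : PySem.Dict String (List String)) {v v' : PySem.Set String}
    (h : v ⊆ v') : pvUnvisitedKeys d v' ≤ pvUnvisitedKeys d v := by
  unfold pvUnvisitedKeys
  rw [← List.countP_eq_length_filter, ← List.countP_eq_length_filter]
  refine List.countP_mono_left (fun x _ hx => ?_)
  simp only [Bool.not_eq_true', ← Bool.not_eq_true, PySem.Set.contains,
    List.contains_iff_mem] at hx ⊢
  exact fun hmem => hx (h hmem)

theorem pv_subset_add (v : PySem.Set String) (node : String) : v ⊆ PySem.Set.add v node :=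
  fun x hx => (PySem.Set.mem_add v node x).mpr (Or.inl hx)

theorem pv_getD_not_key (d : PySem.Dict String (List String)) (node : String)
    (h : ¬ node ∈ PySem.Dict.keys d) : PySem.Dict.getD d node [] = [] := by
  unfold PySem.Dict.getD
  rw [(PySem.Dict.get?_eq_none_iff_not_mem_keys d node).mpr h]
  rfl

-- B: iterative DFS with an explicit stack; the Lean list's HEAD is the Python list's END
-- (Python pops from the end and appends reversed(graph[node]), so the pop order is the
--  original neighbor order — here: pop the head, prepend the neighbor list).
def pvGoB (d : PySem.Dict String (List String)) (stack : List String) (v : PySem.Set String)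
    (acc : List String) : List String :=
  match stack with
  | [] => acc
  | node :: rest =>
    if PySem.Set.contains v node then pvGoB d rest v acc             -- if node in visited: continue
    else pvGoB d (PySem.Dict.getD d node [] ++ rest)
           (PySem.Set.add v node) (acc ++ [node])                     -- visit, push neighbors
termination_by (pvUnvisitedKeys d v, stack.length)
decreasing_by
  · exact Prod.Lex.right _ (Nat.lt_succ_self _)
  · rename_i hnv
    by_cases hk : node ∈ PySem.Dict.keys d
    · refine Prod.Lex.left _ _ (pv_unvisited_lt d v node hk ?_)
      simpa [PySem.Set.contains, List.contains_iff_mem] using hnv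
    · rw [pv_getD_not_key d node hk]
      have h1 : pvUnvisitedKeys d (PySem.Set.add v node) ≤ pvUnvisitedKeys d v :=
        pv_unvisited_mono d (pv_subset_add v node)
      rcases Nat.lt_or_eq_of_le h1 with h | h
      · exact Prod.Lex.left _ _ h
      · rw [h]; exact Prod.Lex.right _ (Nat.lt_succ_self _)

def get_reachable_functions_alt (graph : List (String × List String)) : List (String × List String) :=
  let d := PySem.Dict.ofList graph
  (List.foldl
      (fun rd func => PySem.Dict.insert rd func (pvGoB d [func] PySem.Set.empty []))
      PySem.Dict.empty (PySem.Dict.keys d)).items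

-- ===== PRECONDITION & SPEC =====
-- Pre_ excludes exactly the inputs on which Python's A raises KeyError: a neighbor listed in
-- the dict that is not itself a key is always reached unvisited from its own key's source
-- traversal, so A raises there (and B's Python raises KeyError there too).
def Pre_get_reachable_functions (graph : List (String × List String)) : Prop :=
  ∀ p ∈ (PySem.Dict.ofList graph).items, ∀ n ∈ p.2, n ∈ PySem.Dict.keys (PySem.Dict.ofList graph)
instance (graph : List (String × List String)) : Decidable (Pre_get_reachable_functions graph) := by
  unfold Pre_get_reachable_functions; infer_instance

def pvWitness_get_reachable_functions : (List (String × List String)) :=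
  [("a", ["b", "a"]), ("b", [])]

def Spec_get_reachable_functions (graph : List (String × List String)) (out : List (String × List String)) : Prop := out = get_reachable_functions_alt graph
instance (graph : List (String × List String)) (out : List (String × List String)) : Decidable (Spec_get_reachable_functions graph out) := by unfold Spec_get_reachable_functions; infer_instance

-- ===== CLAIM (what is proved, stated in full; the proofs are below) =====
def Claim_equal_get_reachable_functions : Prop := ∀ (graph : List (String × List String)), Dom_get_reachable_functions graph → Pre_get_reachable_functions graph → Spec_get_reachable_functions graph (get_reachable_functions graph)

-- ===== LEMMAS AND PROOFS =====

-- the visited set only grows through A's dfs / neighbor loop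
theorem pvDfs_mono (d : PySem.Dict String (List String)) :
    ∀ f : Nat, (∀ node v, v ⊆ (pvDfsA d f node v).2) ∧ (∀ ns v, v ⊆ (pvLoopA d f ns v).2) := by
  intro f
  induction f with
  | zero =>
    constructor
    · intro node v; simp [pvDfsA]
    · intro ns
      induction ns with
      | nil => intro v; simp [pvLoopA]
      | cons n ns ih =>
        intro v
        by_cases h : n ∈ v
        · simpa [pvLoopA, h] using ih v
        · simpa [pvLoopA, pvDfsA, h] using ih v
  | succ f ih =>
    have hdfs : ∀ node v, v ⊆ (pvDfsA d (f + 1) node v).2 := by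
      intro node v
      simp only [pvDfsA]
      exact List.Subset.trans (pv_subset_add v node) (ih.2 _ _)
    refine ⟨hdfs, ?_⟩
    intro ns
    induction ns with
    | nil => intro v; simp [pvLoopA]
    | cons n ns ihn =>
      intro v
      by_cases h : n ∈ v
      · simpa [pvLoopA, h] using ihn v
      · simpa [pvLoopA, h] using List.Subset.trans (hdfs n v) (ihn _)

theorem pv_unvisited_empty_le (d : PySem.Dict String (List String)) :
    pvUnvisitedKeys d PySem.Set.empty ≤ PySem.Dict.size d := by
  unfold pvUnvisitedKeys
  calc ((PySem.Dict.keys d).filter _).length ≤ (PySem.Dict.keys d).length :=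
        List.length_filter_le _ _
    _ = PySem.Dict.size d := by simp [PySem.Dict.keys, PySem.Dict.size]

-- THE BRIDGE: running the stack machine from `node :: s` with `node` unvisited is running
-- A's dfs on `node` and continuing from `s` with the updated visited set; similarly a block
-- `ns ++ s` of pending neighbors simulates A's neighbor loop.  Fuel `f` larger than the
-- number of unvisited keys is never exhausted.
theorem pvPQ (d : PySem.Dict String (List String)) :
    ∀ f : Nat,
      (∀ node v s acc, node ∉ v → pvUnvisitedKeys d v < f →
        pvGoB d (node :: s) v acc = pvGoB d s (pvDfsA d f node v).2 (acc ++ (pvDfsA d f node v).1)) ∧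
      (∀ ns v s acc, (pvUnvisitedKeys d v < f ∨ ns = []) →
        pvGoB d (ns ++ s) v acc = pvGoB d s (pvLoopA d f ns v).2 (acc ++ (pvLoopA d f ns v).1)) := by
  intro f
  induction f with
  | zero =>
    constructor
    · intro node v s acc _ hcard; omega
    · intro ns v s acc h
      rcases h with h | h
      · omega
      · subst h; simp [pvLoopA]
  | succ f ih =>
    have hP : ∀ node v s acc, node ∉ v → pvUnvisitedKeys d v < f + 1 →
        pvGoB d (node :: s) v acc
          = pvGoB d s (pvDfsA d (f + 1) node v).2 (acc ++ (pvDfsA d (f + 1) node v).1) := by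
      intro node v s acc hnv hcard
      rw [pvGoB]
      simp only [PySem.Set.contains, List.contains_iff_mem, hnv, if_false]
      have hQ : (pvUnvisitedKeys d (PySem.Set.add v node) < f ∨ PySem.Dict.getD d node [] = []) := by
        by_cases hk : node ∈ PySem.Dict.keys d
        · have := pv_unvisited_lt d v node hk hnv
          omega
        · exact Or.inr (pv_getD_not_key d node hk)
      have hq := (ih.2) (PySem.Dict.getD d node []) (PySem.Set.add v node) s (acc ++ [node]) hQ
      rw [hq]
      simp [pvDfsA]
    refine ⟨hP, ?_⟩
    intro ns
    induction ns with
    | nil => intro v s acc _; simp [pvLoopA]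
    | cons n ns ihn =>
      intro v s acc h
      have hcard : pvUnvisitedKeys d v < f + 1 := by
        rcases h with h | h
        · exact h
        · exact absurd h (List.cons_ne_nil n ns)
      by_cases hv : n ∈ v
      · have hskip : pvGoB d ((n :: ns) ++ s) v acc = pvGoB d (ns ++ s) v acc := by
          rw [List.cons_append, pvGoB]; simp [hv]
        rw [hskip, ihn v s acc (Or.inl hcard)]
        simp [pvLoopA, hv]
      · rw [List.cons_append, hP n v (ns ++ s) acc hv hcard]
        have hmono : pvUnvisitedKeys d (pvDfsA d (f + 1) n v).2 ≤ pvUnvisitedKeys d v :=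
          pv_unvisited_mono d ((pvDfs_mono d (f + 1)).1 n v)
        rw [ihn (pvDfsA d (f + 1) n v).2 s (acc ++ (pvDfsA d (f + 1) n v).1) (Or.inl (by omega))]
        simp [pvLoopA, hv, List.append_assoc]

-- per-source equality: the stack run from [func] is exactly dfs(func) with fuel d.size + 1
theorem pv_source_eq (d : PySem.Dict String (List String)) (func : String) :
    pvGoB d [func] PySem.Set.empty []
      = (pvDfsA d (PySem.Dict.size d + 1) func PySem.Set.empty).1 := by
  have hcard : pvUnvisitedKeys d PySem.Set.empty < PySem.Dict.size d + 1 := by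
    have := pv_unvisited_empty_le d; omega
  have h := (pvPQ d (PySem.Dict.size d + 1)).1 func PySem.Set.empty [] []
    (by simp [PySem.Set.empty]) hcard
  rw [h, pvGoB]
  simp

-- ===== VERDICT (by name: the statement is the Claim_ definition above) =====
theorem get_reachable_functions_spec : Claim_equal_get_reachable_functions := by
  intro graph _ _
  unfold Spec_get_reachable_functions get_reachable_functions get_reachable_functions_alt
  have hfun :
      (fun (rd : PySem.Dict String (List String)) func =>
          PySem.Dict.insert rd func
            (pvDfsA (PySem.Dict.ofList graph) (PySem.Dict.size (PySem.Dict.ofList graph) + 1) func PySem.Set.empty).1)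
        = (fun rd func => PySem.Dict.insert rd func (pvGoB (PySem.Dict.ofList graph) [func] PySem.Set.empty [])) := by
    funext rd func
    rw [pv_source_eq]
  simp only [hfun]
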